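-- pv_equiv track=rewrite | github.com/jeffscott2/ceiling-zero | week_6_code/tdd_greet.py | greet_list
-- ===== SOURCE A (Python) =====
-- def is_last_element(names, idx):
--     return idx == len(names) - 1
--
-- def greet_list(names):
--     greeting = "Hello"
--
--     for i in range(0, len(names)):
--         if is_last_element(names, i) and len(names) == 2:
--             greeting += " and  " + names[i]
--         elif is_last_element(names, i):
--             greeting += ", and " + names[i]
--         else:
--                 greeting += ", " + names[i]
--     greeting += "."
--     return greeting
-- ===== SOURCE B (Python) =====
-- def greet_list(names):
--     if not names:
--         return "Hello."
--     *init, last = names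
--     joined = "".join(", " + n for n in init)
--     sep = " and  " if len(names) == 2 else ", and "
--     return "Hello" + joined + sep + last + "."
-- ===== Notes on version B (the rewrite author's own statement) =====
-- stated objective: simpler
-- what changed: Replaces the indexed loop with per-element last/two-element branching by an early empty return, splitting off the last name, one ''.join over the initial names and a single out-of-loop separator branch.
import Mathlib
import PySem

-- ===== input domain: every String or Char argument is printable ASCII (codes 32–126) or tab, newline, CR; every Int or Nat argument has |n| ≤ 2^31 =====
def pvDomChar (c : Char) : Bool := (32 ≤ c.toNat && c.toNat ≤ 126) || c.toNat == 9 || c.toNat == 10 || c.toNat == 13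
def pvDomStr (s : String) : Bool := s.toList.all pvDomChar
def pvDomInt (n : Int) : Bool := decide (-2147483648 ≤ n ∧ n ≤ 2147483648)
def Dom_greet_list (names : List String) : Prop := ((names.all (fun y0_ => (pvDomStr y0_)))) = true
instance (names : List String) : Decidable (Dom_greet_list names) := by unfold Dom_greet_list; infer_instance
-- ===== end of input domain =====

-- B replaces A's indexed loop with per-element branching by an early empty return, one join
-- over the initial names and a single out-of-loop separator branch (objective: simpler).

-- ===== PORT A =====
def is_last_element (names : List String) (idx : Int) : Bool :=
  idx == (names.length : Int) - 1

-- index i always lies in range(0, len(names)), so the "" default of pyGetD is never used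
def greet_list (names : List String) : String :=
  let greeting := "Hello"
  let greeting :=
    (PySem.List.pyRange 0 (names.length : Int) 1).foldl
      (fun g i =>
        if is_last_element names i && (names.length == 2) then
          g ++ (" and  " ++ PySem.List.pyGetD names i "")
        else if is_last_element names i then
          g ++ (", and " ++ PySem.List.pyGetD names i "")
        else
          g ++ (", " ++ PySem.List.pyGetD names i "")) greeting
  greeting ++ "."

-- ===== PORT B =====
def greet_list_alt (names : List String) : String :=
  match names with
  | [] => "Hello."
  | _ :: _ =>
    let init := names.dropLast
    let last := names.getLastD ""
    let joined := String.join (init.map (fun n => ", " ++ n))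
    let sep := if names.length == 2 then " and  " else ", and "
    "Hello" ++ joined ++ sep ++ last ++ "."

-- ===== PRECONDITION & SPEC =====
def Spec_greet_list (names : List String) (out : String) : Prop := out = greet_list_alt names
instance (names : List String) (out : String) : Decidable (Spec_greet_list names out) := by unfold Spec_greet_list; infer_instance

-- ===== CLAIM (what is proved, stated in full; the proofs are below) =====
def Claim_equal_greet_list : Prop := ∀ (names : List String), Dom_greet_list names → Spec_greet_list names (greet_list names)

-- ===== LEMMAS AND PROOFS =====

theorem string_foldl_append (l : List String) (s : String) :
    l.foldl (· ++ ·) s = s ++ l.foldl (· ++ ·) "" := by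
  induction l generalizing s with
  | nil => simp
  | cons x xs ih =>
    simp only [List.foldl_cons]
    rw [ih (s ++ x), ih ("" ++ x)]
    simp [String.append_assoc]

theorem string_join_append (a b : List String) :
    String.join (a ++ b) = String.join a ++ String.join b := by
  simp only [String.join, List.foldl_append]
  rw [string_foldl_append]

-- A's loop over the first m indices (all non-last) appends ", "+names[i] for each.
theorem greet_list_fold_prefix (names : List String) (m : Nat) (hm : m + 1 ≤ names.length)
    (g : String) :
    (PySem.List.pyRange 0 (m : Int) 1).foldl
      (fun g i =>
        if is_last_element names i && (names.length == 2) then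
          g ++ (" and  " ++ PySem.List.pyGetD names i "")
        else if is_last_element names i then
          g ++ (", and " ++ PySem.List.pyGetD names i "")
        else
          g ++ (", " ++ PySem.List.pyGetD names i "")) g
    = g ++ String.join (((names.take m).map (fun n => ", " ++ n))) := by
  induction m generalizing g with
  | zero =>
    simp [PySem.List.pyRange_one_eq_nil, String.join]
  | succ k ih =>
    have hk : k + 1 ≤ names.length := by omega
    have hsplit : PySem.List.pyRange 0 ((k + 1 : Nat) : Int) 1
        = PySem.List.pyRange 0 (k : Int) 1 ++ [(k : Int)] := by
      push_cast
      exact PySem.List.pyRange_one_succ_right (by positivity)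
    rw [hsplit, List.foldl_append, ih hk]
    have hlast : is_last_element names (k : Int) = false := by
      simp only [is_last_element, beq_eq_false_iff_ne, ne_eq]
      omega
    have hget : PySem.List.pyGetD names (k : Int) "" = names[k]'(by omega) := by
      rw [PySem.List.pyGetD_eq_getElem _ "" (by positivity) (by omega)]
      simp
    have htake : names.take (k + 1) = names.take k ++ [names[k]'(by omega)] :=
      List.take_succ_eq_append_getElem (by omega)
    simp only [List.foldl_cons, List.foldl_nil, hlast, Bool.false_and, hget, htake,
      List.map_append, List.map_cons, List.map_nil, string_join_append]
    simp [String.join, String.append_assoc]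

theorem greet_list_eq_alt (names : List String) : greet_list names = greet_list_alt names := by
  cases names with
  | nil => rfl
  | cons a rest =>
    have hlen : 1 ≤ (a :: rest).length := by simp
    have hsplit : PySem.List.pyRange 0 ((a :: rest).length : Int) 1
        = PySem.List.pyRange 0 (((a :: rest).length - 1 : Nat) : Int) 1
          ++ [(((a :: rest).length - 1 : Nat) : Int)] := by
      have h : ((a :: rest).length : Int) = (((a :: rest).length - 1 : Nat) : Int) + 1 := by
        omega
      rw [h]
      exact PySem.List.pyRange_one_succ_right (by positivity)
    have hlast : is_last_element (a :: rest) (((a :: rest).length - 1 : Nat) : Int) = true := by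
      simp only [is_last_element, beq_iff_eq]
      omega
    have hget : PySem.List.pyGetD (a :: rest) (((a :: rest).length - 1 : Nat) : Int) ""
        = (a :: rest).getLastD "" := by
      rw [PySem.List.pyGetD_eq_getElem _ "" (by positivity) (by omega)]
      rw [List.getLastD_eq_getLast?, List.getLast?_eq_getElem?]
      simp
      rfl
    have hdrop : (a :: rest).take ((a :: rest).length - 1) = (a :: rest).dropLast :=
      List.dropLast_eq_take.symm
    simp only [greet_list, greet_list_alt]
    rw [hsplit, List.foldl_append,
      greet_list_fold_prefix (a :: rest) ((a :: rest).length - 1) (by omega) "Hello"]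
    simp only [List.foldl_cons, List.foldl_nil, hlast, Bool.true_and, hget, hdrop]
    by_cases h2 : (a :: rest).length = 2
    · simp [h2, String.append_assoc]
    · have h2' : rest.length ≠ 1 := by
        intro h
        exact h2 (by simp [h])
      simp [h2', String.append_assoc]

-- ===== VERDICT (by name: the statement is the Claim_ definition above) =====
theorem greet_list_spec : Claim_equal_greet_list := by
  intro names _
  unfold Spec_greet_list
  exact greet_list_eq_alt names
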